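-- pv_equiv track=rewrite | github.com/harsh-c31/Python-Programming | DSA/Stacks/humpyjumpsnext.py | max_stamina
-- ===== SOURCE A (Python) =====
-- def max_stamina(heights):
--     n=len(heights)
--     max_xor=0
--     for i in range(n):
--         curr=heights[i]
--         for j in range(i+1,n):
--             if heights[j]>heights[j-1]:
--                 curr=curr^heights[j]
--             else:
--                 break
--         max_xor=max(max_xor,curr)
--     return max_xor
-- ===== SOURCE B (Python) =====
-- def max_stamina(heights):
--     # One backward pass: maintain the XOR of the maximal increasing run
--     # starting at the current index, and the best seen so far.
--     best = 0
--     suf = 0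
--     prev = None
--     for h in reversed(heights):
--         if prev is not None and prev > h:
--             suf = suf ^ h
--         else:
--             suf = h
--         best = max(best, suf)
--         prev = h
--     return best
-- ===== Notes on version B (the rewrite author's own statement) =====
-- stated objective: faster
-- what changed: Replaced the quadratic per-start rescans with a single backward pass that maintains the suffix XOR of the current maximal increasing run and the running maximum.
import Mathlib
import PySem

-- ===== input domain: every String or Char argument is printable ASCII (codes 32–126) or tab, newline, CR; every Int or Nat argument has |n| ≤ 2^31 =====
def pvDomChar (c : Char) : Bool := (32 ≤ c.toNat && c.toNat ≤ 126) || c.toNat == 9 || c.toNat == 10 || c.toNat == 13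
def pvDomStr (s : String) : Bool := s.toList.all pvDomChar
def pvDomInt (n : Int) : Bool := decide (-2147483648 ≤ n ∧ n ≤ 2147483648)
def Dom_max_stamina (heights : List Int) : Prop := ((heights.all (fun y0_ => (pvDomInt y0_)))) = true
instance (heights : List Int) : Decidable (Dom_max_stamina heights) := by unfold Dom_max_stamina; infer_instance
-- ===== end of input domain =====

-- B replaces A's quadratic per-start rescans with a single backward pass (asymptotically faster).


-- ===== PORT A =====
-- inner loop: for j in range(i+1, n): if heights[j] > heights[j-1]: curr ^= heights[j] else: break
def aInner (heights : List Int) (j : Nat) (curr : Int) : Int :=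
  if _h : j < heights.length then
    if heights.getD j 0 > heights.getD (j - 1) 0 then
      aInner heights (j + 1) (PySem.Int.bxor curr (heights.getD j 0))
    else curr
  else curr
termination_by heights.length - j

def max_stamina (heights : List Int) : Int :=
  (List.range heights.length).foldl
    (fun max_xor i => max max_xor (aInner heights (i + 1) (heights.getD i 0))) 0

-- ===== PORT B =====
def max_stamina_alt (heights : List Int) : Int :=
  (heights.reverse.foldl
    (fun (st : Int × Int × Option Int) h =>
      let suf := match st.2.2 with
        | some prev => if prev > h then PySem.Int.bxor st.2.1 h else h
        | none => h
      (max st.1 suf, suf, some h)) (0, 0, none)).1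

-- ===== PRECONDITION & SPEC =====
def Spec_max_stamina (heights : List Int) (out : Int) : Prop := out = max_stamina_alt heights
instance (heights : List Int) (out : Int) : Decidable (Spec_max_stamina heights out) := by unfold Spec_max_stamina; infer_instance

-- ===== CLAIM (what is proved, stated in full; the proofs are below) =====
def Claim_equal_max_stamina : Prop := ∀ (heights : List Int), Dom_max_stamina heights → Spec_max_stamina heights (max_stamina heights)

-- ===== LEMMAS AND PROOFS =====

theorem bxor_eq_intXor (a b : Int) : PySem.Int.bxor a b = Int.xor a b := by
  cases a with
  | ofNat m =>
    cases b with
    | ofNat n => simp [PySem.Int.bxor, Int.xor]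
    | negSucc n =>
      simp [PySem.Int.bxor, Int.xor, Int.negSucc_eq]
      omega
  | negSucc m =>
    cases b with
    | ofNat n =>
      simp [PySem.Int.bxor, Int.xor, Int.negSucc_eq]
      omega
    | negSucc n =>
      simp [PySem.Int.bxor, Int.xor, Int.negSucc_eq]
      omega

theorem bxor_assoc (a b c : Int) :
    PySem.Int.bxor (PySem.Int.bxor a b) c = PySem.Int.bxor a (PySem.Int.bxor b c) := by
  simp only [bxor_eq_intXor]
  cases a <;> cases b <;> cases c <;> simp [Int.xor, Nat.xor_assoc]

-- XOR of the maximal strictly increasing run at the head of the list.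
def runXor : List Int → Int
  | [] => 0
  | [x] => x
  | x :: y :: t => if y > x then PySem.Int.bxor x (runXor (y :: t)) else x

-- left-accumulating version of runXor (matches A's inner loop)
def goA (c p : Int) : List Int → Int
  | [] => c
  | y :: t => if y > p then goA (PySem.Int.bxor c y) y t else c

theorem goA_xor (t : List Int) : ∀ (c d p : Int), goA (PySem.Int.bxor c d) p t = PySem.Int.bxor c (goA d p t) := by
  induction t with
  | nil => intro c d p; simp [goA]
  | cons y t ih =>
    intro c d p
    simp only [goA]
    split
    · rw [bxor_assoc, ih]
    · rfl

theorem runXor_eq_goA (t : List Int) : ∀ p : Int, runXor (p :: t) = goA p p t := by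
  induction t with
  | nil => intro p; simp [runXor, goA]
  | cons y t ih =>
    intro p
    simp only [runXor, goA]
    split
    · rw [goA_xor t p y y, ih]
    · rfl

theorem aInner_eq (l : List Int) (j : Nat) (c : Int) :
    aInner l (j + 1) c = goA c (l.getD j 0) (l.drop (j + 1)) := by
  by_cases h : j + 1 < l.length
  · rw [aInner, dif_pos h, List.drop_eq_getElem_cons h]
    have hg : l.getD (j + 1) 0 = l[j + 1] := List.getD_eq_getElem l 0 h
    simp only [goA, Nat.add_sub_cancel, hg]
    split
    · rw [aInner_eq l (j + 1) (PySem.Int.bxor c l[j + 1]), hg]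
    · rfl
  · rw [aInner, dif_neg h, List.drop_eq_nil_of_le (Nat.le_of_not_lt h), goA]
termination_by l.length - j

theorem aInner_eq_runXor (l : List Int) (i : Nat) (h : i < l.length) :
    aInner l (i + 1) (l.getD i 0) = runXor (l.drop i) := by
  rw [aInner_eq, List.drop_eq_getElem_cons h, runXor_eq_goA, List.getD_eq_getElem l 0 h]

-- running-maximum of runXor over all suffixes, from the left (A's outer loop)
def bestFrom (m : Int) : List Int → Int
  | [] => m
  | x :: t => bestFrom (max m (runXor (x :: t))) t

-- maximum of runXor over all suffixes, accumulated from the right (B's pass)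
def bestOf : List Int → Int
  | [] => 0
  | x :: t => max (bestOf t) (runXor (x :: t))

theorem foldA (l : List Int) : ∀ m : Int,
    (List.range l.length).foldl (fun acc i => max acc (runXor (l.drop i))) m = bestFrom m l := by
  induction l with
  | nil => intro m; simp [bestFrom]
  | cons x t ih =>
    intro m
    rw [List.length_cons, List.range_succ_eq_map, List.foldl_cons, List.foldl_map]
    simp only [List.drop_zero, List.drop_succ_cons]
    rw [ih, bestFrom]

theorem bestOf_nonneg (l : List Int) : 0 ≤ bestOf l := by
  induction l with
  | nil => simp [bestOf]
  | cons x t ih => exact le_trans ih (le_max_left _ _)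

theorem bestFrom_eq (l : List Int) : ∀ m : Int, 0 ≤ m → bestFrom m l = max m (bestOf l) := by
  induction l with
  | nil => intro m hm; simp [bestFrom, bestOf]; omega
  | cons x t ih =>
    intro m hm
    rw [bestFrom, bestOf, ih _ (le_trans hm (le_max_left _ _))]
    omega

theorem max_stamina_eq_bestOf (l : List Int) : max_stamina l = max 0 (bestOf l) := by
  unfold max_stamina
  have hc : (List.range l.length).foldl
      (fun max_xor i => max max_xor (aInner l (i + 1) (l.getD i 0))) 0
      = (List.range l.length).foldl (fun acc i => max acc (runXor (l.drop i))) 0 := by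
    apply PySem.List.foldl_congr_mem
    intro acc i hi
    rw [aInner_eq_runXor l i (List.mem_range.mp hi)]
  rw [hc, foldA, bestFrom_eq l 0 le_rfl]

def bStep (st : Int × Int × Option Int) (h : Int) : Int × Int × Option Int :=
  let suf := match st.2.2 with
    | some prev => if prev > h then PySem.Int.bxor st.2.1 h else h
    | none => h
  (max st.1 suf, suf, some h)

theorem bInv (t : List Int) : ∀ x : Int,
    List.foldr (fun a b => bStep b a) (0, 0, none) (x :: t)
      = (bestOf (x :: t), runXor (x :: t), some x) := by
  induction t with
  | nil => intro x; simp [bStep, bestOf, runXor]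
  | cons y t ih =>
    intro x
    rw [List.foldr_cons, ih y, bStep]
    simp only [bestOf, runXor]
    split
    · rw [PySem.Int.bxor_comm]
    · rfl

theorem max_stamina_alt_eq_bestOf (l : List Int) : max_stamina_alt l = bestOf l := by
  unfold max_stamina_alt
  rw [List.foldl_reverse]
  cases l with
  | nil => simp [bestOf]
  | cons x t =>
    have := bInv t x
    simp only [bStep] at this
    rw [this]

-- ===== VERDICT (by name: the statement is the Claim_ definition above) =====
theorem max_stamina_spec : Claim_equal_max_stamina := by
  intro heights _
  unfold Spec_max_stamina
  rw [max_stamina_eq_bestOf, max_stamina_alt_eq_bestOf]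
  have := bestOf_nonneg heights
  omega
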